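-- pv_equiv track=rewrite | github.com/Haroong/Algorithm | BaekJoon Online Judge/Silver/1235-학생 번호.py | find_shortest_length
-- ===== SOURCE A (Python) =====
-- def find_shortest_length(numbers):
--     unique_number = len(numbers)
--
--     for i in range(1, unique_number + 1):
--         s = set() # 길이를 자른 학번 목록을 집합에 저장
--
--         for j in range(unique_number):
--             splitted_number = numbers[j][-i::]
--             s.add(splitted_number) # 특정 길이만큼 뒤에서부터 잘라서 집합에 add
--             if len(s) < j: # 중복된 숫자가 존재해서 집합에 추가되지 못함
--                 break
--
--         if len(s) == unique_number:
--             return i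
--
--     return len(numbers[0])
-- ===== SOURCE B (Python) =====
-- def find_shortest_length(numbers):
--     n = len(numbers)
--
--     def distinct(i):
--         return len({x[-i:] for x in numbers}) == n
--
--     if not distinct(n):
--         return len(numbers[0])
--     lo, hi = 1, n
--     while lo < hi:
--         mid = (lo + hi) // 2
--         if distinct(mid):
--             hi = mid
--         else:
--             lo = mid + 1
--     return lo
-- ===== Notes on version B (the rewrite author's own statement) =====
-- stated objective: faster
-- what changed: Replaces A's linear scan over candidate suffix lengths (each with an incrementally built set and early break) by a binary search on the length, using that suffix-uniqueness is monotone in the length, with one whole-set distinctness check per probe.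
import Mathlib
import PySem

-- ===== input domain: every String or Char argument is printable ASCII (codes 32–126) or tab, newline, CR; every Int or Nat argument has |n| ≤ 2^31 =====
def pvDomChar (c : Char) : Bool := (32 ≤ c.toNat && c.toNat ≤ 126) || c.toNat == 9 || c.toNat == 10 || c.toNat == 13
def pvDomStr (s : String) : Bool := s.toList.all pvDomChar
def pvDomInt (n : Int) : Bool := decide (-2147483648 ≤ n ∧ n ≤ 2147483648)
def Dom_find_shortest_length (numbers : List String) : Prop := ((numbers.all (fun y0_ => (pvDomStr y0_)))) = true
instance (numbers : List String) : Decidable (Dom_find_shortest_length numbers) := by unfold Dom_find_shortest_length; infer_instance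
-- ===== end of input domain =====

-- B replaces A's linear scan over candidate lengths by a binary search (suffix-uniqueness is
-- monotone in the length), checking each probed length once with a set of suffixes.

-- ===== PORT A =====
-- inner loop: for j in range(unique_number): s.add(numbers[j][-i::]); if len(s) < j: break
def pvInnerA (numbers : List String) (i : Int) : List Int → PySem.Set String → PySem.Set String
  | [], s => s
  | j :: js, s =>
    let sp := PySem.Set.add s (PySem.Str.slice (PySem.List.pyGetD numbers j "") (some (-i)) none)
    if PySem.Set.len sp < j then sp else pvInnerA numbers i js sp

-- outer loop: for i in range(1, unique_number + 1): … ; fall through to len(numbers[0])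
-- (numbers[0] is total here via pyGetD: Pre_ excludes the empty list, where Python raises IndexError)
def pvOuterA (numbers : List String) (n : Int) : List Int → Int
  | [] => PySem.Str.len (PySem.List.pyGetD numbers 0 "")
  | i :: is =>
    let s := pvInnerA numbers i (PySem.List.pyRange 0 n 1) PySem.Set.empty
    if PySem.Set.len s == n then i else pvOuterA numbers n is

def find_shortest_length (numbers : List String) : Int :=
  let n := PySem.List.len numbers
  pvOuterA numbers n (PySem.List.pyRange 1 (n + 1) 1)

-- ===== PORT B =====
-- distinct(i) = len({x[-i:] for x in numbers}) == n
def pvDistinct (numbers : List String) (i : Int) : Bool :=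
  PySem.Set.len (PySem.Set.ofList (numbers.map (fun x => PySem.Str.slice x (some (-i)) none)))
    == PySem.List.len numbers

-- while lo < hi: mid = (lo+hi)//2; if distinct(mid): hi = mid else: lo = mid+1
def pvBsearch (numbers : List String) (lo hi : Int) : Int :=
  if h : lo < hi then
    let mid := PySem.Int.floordiv (lo + hi) 2
    if pvDistinct numbers mid then pvBsearch numbers lo mid
    else pvBsearch numbers (mid + 1) hi
  else lo
termination_by (hi - lo).toNat
decreasing_by
  · have h2 := (PySem.Int.floordiv_lt_iff_lt_mul (a := lo + hi) (b := 2) (q := hi) (by omega)).mpr (by omega)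
    simp only [mid] at *; omega
  · have h1 := (PySem.Int.le_floordiv_iff_mul_le (a := lo + hi) (b := 2) (q := lo) (by omega)).mpr (by omega)
    simp only [mid] at *; omega

def find_shortest_length_alt (numbers : List String) : Int :=
  let n := PySem.List.len numbers
  if !(pvDistinct numbers n) then PySem.Str.len (PySem.List.pyGetD numbers 0 "")
  else pvBsearch numbers 1 n

-- ===== PRECONDITION & SPEC =====
-- Pre_ excludes only the empty list, on which Python A raises IndexError at numbers[0].
def Pre_find_shortest_length (numbers : List String) : Prop := numbers ≠ []
instance (numbers : List String) : Decidable (Pre_find_shortest_length numbers) := by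
  unfold Pre_find_shortest_length; infer_instance
def pvWitness_find_shortest_length : List String := ["12", "34"]
def Spec_find_shortest_length (numbers : List String) (out : Int) : Prop := out = find_shortest_length_alt numbers
instance (numbers : List String) (out : Int) : Decidable (Spec_find_shortest_length numbers out) := by unfold Spec_find_shortest_length; infer_instance

-- ===== CLAIM (what is proved, stated in full; the proofs are below) =====
def Claim_equal_find_shortest_length : Prop := ∀ (numbers : List String), Dom_find_shortest_length numbers → Pre_find_shortest_length numbers → Spec_find_shortest_length numbers (find_shortest_length numbers)

-- ===== LEMMAS AND PROOFS =====

-- the suffix function both ports slice with: x[-i:]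
def pvSuf (i : Int) (x : String) : String := PySem.Str.slice x (some (-i)) none

-- char-level: the length-k suffix of the length-k' suffix is the length-k suffix (k ≤ k')
theorem pvSufL_comp (k k' : Nat) (l : List Char) (hkk : k ≤ k') :
    (l.drop (l.length - k')).drop ((l.drop (l.length - k')).length - k) = l.drop (l.length - k) := by
  rw [List.length_drop, List.drop_drop]
  congr 1
  omega

-- suffix equality is monotone downwards in the length
theorem pvSuf_mono (k k' : Nat) (hk : 0 < k) (hkk : k ≤ k') (x y : String)
    (h : pvSuf (k' : Int) x = pvSuf (k' : Int) y) : pvSuf (k : Int) x = pvSuf (k : Int) y := by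
  have hk' : 0 < k' := lt_of_lt_of_le hk hkk
  apply String.toList_inj.mp
  have hl : (pvSuf (k' : Int) x).toList = (pvSuf (k' : Int) y).toList := by rw [h]
  simp only [pvSuf, PySem.Str.toList_slice, PySem.Chars.slice_eq_listSlice,
    PySem.List.slice_from_neg_natCast _ _ hk', PySem.List.slice_from_neg_natCast _ _ hk] at *
  rw [← pvSufL_comp k k' x.toList hkk, ← pvSufL_comp k k' y.toList hkk, hl]

-- distinctness of suffixes is monotone upwards in the length
theorem pvNodup_mono (numbers : List String) (k k' : Nat) (hk : 0 < k) (hkk : k ≤ k')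
    (h : (numbers.map (pvSuf (k : Int))).Nodup) : (numbers.map (pvSuf (k' : Int))).Nodup := by
  rw [List.Nodup, List.pairwise_map] at *
  exact h.imp (fun {a b} hne he => hne (pvSuf_mono k k' hk hkk a b he))

-- set(xs), as a list, is a sublist of xs
theorem pvOfList_sublist {α : Type} [BEq α] [LawfulBEq α] (l : List α) :
    (PySem.Set.ofList l).Sublist l := by
  induction l using List.reverseRecOn with
  | nil => simp [PySem.Set.ofList]
  | append_singleton xs x ih =>
    rw [PySem.Set.ofList_append_singleton, PySem.Set.add_eq_ite]
    split
    · exact ih.trans (List.sublist_append_left xs [x])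
    · exact List.Sublist.append ih (List.Sublist.refl [x])

theorem pvOfList_length_iff {α : Type} [BEq α] [LawfulBEq α] (l : List α) :
    (PySem.Set.ofList l).length = l.length ↔ l.Nodup := by
  constructor
  · intro h
    have := (pvOfList_sublist l).eq_of_length h
    rw [← this]
    exact PySem.Set.nodup_ofList l
  · intro h
    rw [PySem.Set.ofList_eq_self_of_nodup l h]

-- B's check in terms of Nodup
theorem pvDistinct_iff (numbers : List String) (i : Int) :
    pvDistinct numbers i = true ↔ (numbers.map (pvSuf i)).Nodup := by
  have huf : (fun x => PySem.Str.slice x (some (-i)) none) = pvSuf i := rfl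
  simp only [pvDistinct, PySem.Set.len, PySem.List.len_eq, beq_iff_eq, Nat.cast_inj, huf]
  rw [show numbers.length = (numbers.map (pvSuf i)).length by simp]
  exact pvOfList_length_iff _

-- A's inner loop decides the same Nodup condition, break or no break
theorem pvInnerA_spec (numbers : List String) (i : Int) :
    ∀ (d j : Nat) (s : PySem.Set String), numbers.length - j = d → j ≤ numbers.length →
    s = PySem.Set.ofList ((numbers.map (pvSuf i)).take j) →
    ((pvInnerA numbers i (PySem.List.pyRange (j : Int) (numbers.length : Int) 1) s).length = numbers.length
      ↔ (numbers.map (pvSuf i)).Nodup) := by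
  intro d
  induction d with
  | zero =>
    intro j s hd hj hs
    have hj' : j = numbers.length := by omega
    subst hj'
    rw [PySem.List.pyRange_one_eq_nil (by omega)]
    simp only [pvInnerA]
    rw [hs, List.take_of_length_le (by simp)]
    rw [show numbers.length = (numbers.map (pvSuf i)).length by simp]
    exact pvOfList_length_iff _
  | succ d ih =>
    intro j s hd hj hs
    have hjlt : j < numbers.length := by omega
    rw [PySem.List.pyRange_one_cons (by exact_mod_cast hjlt)]
    simp only [pvInnerA]
    have helt : PySem.Str.slice (PySem.List.pyGetD numbers (j : Int) "") (some (-i)) none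
        = (numbers.map (pvSuf i))[j]'(by simpa using hjlt) := by
      rw [PySem.List.pyGetD_natCast, List.getD_eq_getElem _ _ hjlt]
      simp [pvSuf]
    have hsp : PySem.Set.add s (PySem.Str.slice (PySem.List.pyGetD numbers (j : Int) "") (some (-i)) none)
        = PySem.Set.ofList ((numbers.map (pvSuf i)).take (j + 1)) := by
      rw [helt, hs, ← PySem.Set.ofList_append_singleton]
      congr 1
      rw [List.take_add_one, List.getElem?_eq_getElem (by simpa using hjlt)]
      rfl
    rw [hsp]
    have hlen : ((PySem.Set.ofList ((numbers.map (pvSuf i)).take (j + 1))).length : Int)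
        = PySem.Set.len (PySem.Set.ofList ((numbers.map (pvSuf i)).take (j + 1))) := by
      simp [PySem.Set.len]
    split
    · -- break: the set already lost at least two elements
      rename_i hbr
      constructor
      · intro habs
        exfalso
        have : ((numbers.length : Nat) : Int) < (j : Int) := by rw [← habs, hlen]; exact hbr
        omega
      · intro hnd
        exfalso
        have hndt : ((numbers.map (pvSuf i)).take (j + 1)).Nodup := hnd.sublist (List.take_sublist _ _)
        have heq := PySem.Set.ofList_eq_self_of_nodup _ hndt
        rw [heq] at hbr
        simp only [PySem.Set.len] at hbr
        have hlt : j + 1 ≤ (numbers.map (pvSuf i)).length := by simpa using hjlt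
        rw [List.length_take_of_le hlt] at hbr
        omega
    · -- no break: continue with the extended set
      have : ((j : Int) + 1) = (((j + 1 : Nat)) : Int) := by push_cast; ring
      rw [this]
      exact ih (j + 1) _ (by omega) (by omega) rfl

-- A's per-length check equals B's pvDistinct
theorem pvCheck_eq (numbers : List String) (i : Int) :
    (PySem.Set.len (pvInnerA numbers i (PySem.List.pyRange 0 (PySem.List.len numbers) 1) PySem.Set.empty)
      == PySem.List.len numbers) = pvDistinct numbers i := by
  rw [Bool.eq_iff_iff]
  have h0 : (PySem.Set.empty : PySem.Set String) = PySem.Set.ofList ((numbers.map (pvSuf i)).take 0) := rfl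
  have hr : (0 : Int) = ((0 : Nat) : Int) := rfl
  have hn : PySem.List.len numbers = ((numbers.length : Nat) : Int) := by simp [PySem.List.len_eq]
  rw [hn, hr]
  have hspec := pvInnerA_spec numbers i numbers.length 0 PySem.Set.empty (by omega) (by omega) h0
  rw [pvDistinct_iff, ← hspec]
  simp [PySem.Set.len]

-- A's outer loop: no hit in [a, b) falls through to len(numbers[0])
theorem pvOuterA_none (numbers : List String) :
    ∀ (d : Nat) (a b : Int), (b - a).toNat = d →
    (∀ x, a ≤ x → x < b → pvDistinct numbers x = false) →
    pvOuterA numbers (PySem.List.len numbers) (PySem.List.pyRange a b 1)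
      = PySem.Str.len (PySem.List.pyGetD numbers 0 "") := by
  intro d
  induction d with
  | zero =>
    intro a b hd h
    rw [PySem.List.pyRange_one_eq_nil (by omega)]
    rfl
  | succ d ih =>
    intro a b hd h
    rw [PySem.List.pyRange_one_cons (by omega)]
    simp only [pvOuterA]
    rw [pvCheck_eq, h a (le_refl a) (by omega)]
    simp only [Bool.false_eq_true, if_false]
    exact ih (a + 1) b (by omega) (fun x hx1 hx2 => h x (by omega) hx2)

-- A's outer loop returns the first hit
theorem pvOuterA_found (numbers : List String) :
    ∀ (d : Nat) (a b r : Int), (b - a).toNat = d → a ≤ r → r < b →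
    pvDistinct numbers r = true →
    (∀ x, a ≤ x → x < r → pvDistinct numbers x = false) →
    pvOuterA numbers (PySem.List.len numbers) (PySem.List.pyRange a b 1) = r := by
  intro d
  induction d with
  | zero => intro a b r hd har hrb _ _; omega
  | succ d ih =>
    intro a b r hd har hrb hQ hmin
    rw [PySem.List.pyRange_one_cons (by omega)]
    simp only [pvOuterA]
    rw [pvCheck_eq]
    by_cases hra : a = r
    · subst hra; rw [hQ]; simp
    · rw [hmin a (le_refl a) (by omega)]
      simp only [Bool.false_eq_true, if_false]
      exact ih (a + 1) b r (by omega) (by omega) hrb hQ (fun x hx1 hx2 => hmin x (by omega) hx2)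

-- B's binary search returns the least hit, given monotonicity
theorem pvBsearch_spec (numbers : List String)
    (mono : ∀ x y : Int, 1 ≤ x → x ≤ y → pvDistinct numbers x = true → pvDistinct numbers y = true)
    (r : Int) (hr1 : 1 ≤ r) (hQ : pvDistinct numbers r = true)
    (hmin : ∀ x, 1 ≤ x → x < r → pvDistinct numbers x = false) :
    ∀ (d : Nat) (lo hi : Int), (hi - lo).toNat ≤ d → 1 ≤ lo → lo ≤ r → r ≤ hi →
    pvBsearch numbers lo hi = r := by
  intro d
  induction d with
  | zero =>
    intro lo hi hd h1 hlor hrhi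
    rw [pvBsearch]
    rw [dif_neg (by omega)]
    omega
  | succ d ih =>
    intro lo hi hd h1 hlor hrhi
    rw [pvBsearch]
    by_cases hlh : lo < hi
    · rw [dif_pos hlh]
      have hml := (PySem.Int.le_floordiv_iff_mul_le (a := lo + hi) (b := 2) (q := lo) (by omega)).mpr (by omega)
      have hmh := (PySem.Int.floordiv_lt_iff_lt_mul (a := lo + hi) (b := 2) (q := hi) (by omega)).mpr (by omega)
      set mid := PySem.Int.floordiv (lo + hi) 2 with hmid
      by_cases hQm : pvDistinct numbers mid = true
      · rw [if_pos hQm]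
        have hrm : r ≤ mid := by
          by_contra hc
          rw [hmin mid (by omega) (by omega)] at hQm
          exact absurd hQm (by simp)
        exact ih lo mid (by omega) h1 hlor hrm
      · rw [if_neg hQm]
        have hmr : mid + 1 ≤ r := by
          by_contra hc
          exact hQm (mono r mid hr1 (by omega) hQ)
        exact ih (mid + 1) hi (by omega) (by omega) hmr hrhi
    · rw [dif_neg hlh]; omega

-- pvDistinct is monotone in the length on [1, ∞)
theorem pvDistinct_mono (numbers : List String) :
    ∀ x y : Int, 1 ≤ x → x ≤ y → pvDistinct numbers x = true → pvDistinct numbers y = true := by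
  intro x y hx hxy h
  have hx' : x = ((x.toNat : Nat) : Int) := by omega
  have hy' : y = ((y.toNat : Nat) : Int) := by omega
  rw [pvDistinct_iff] at *
  rw [hy']
  rw [hx'] at h
  exact pvNodup_mono numbers x.toNat y.toNat (by omega) (by omega) h

-- ===== VERDICT (by name: the statement is the Claim_ definition above) =====
theorem find_shortest_length_spec : Claim_equal_find_shortest_length := by
  intro numbers _ hpre
  unfold Spec_find_shortest_length
  have hlen : 0 < numbers.length := List.length_pos_of_ne_nil hpre
  simp only [find_shortest_length, find_shortest_length_alt]
  set N := PySem.List.len numbers with hN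
  have hNval : N = (numbers.length : Int) := by simp [hN, PySem.List.len_eq]
  by_cases hQN : pvDistinct numbers N = true
  · -- some length works: both return the least working length
    have hex : ∃ m : Nat, pvDistinct numbers ((m : Int) + 1) = true := by
      refine ⟨numbers.length - 1, ?_⟩
      have : ((numbers.length - 1 : Nat) : Int) + 1 = N := by rw [hNval]; omega
      rwa [this]
    classical
    set r0 := Nat.find hex with hr0
    set r : Int := (r0 : Int) + 1 with hr
    have hQr : pvDistinct numbers r = true := Nat.find_spec hex
    have hmin : ∀ x : Int, 1 ≤ x → x < r → pvDistinct numbers x = false := by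
      intro x hx1 hxr
      have hm : (x - 1).toNat < r0 := by omega
      have := Nat.find_min hex hm
      have hxe : (((x - 1).toNat : Nat) : Int) + 1 = x := by omega
      rw [hxe] at this
      exact Bool.eq_false_iff.mpr this
    have hrN : r ≤ N := by
      have : r0 ≤ numbers.length - 1 := by
        apply Nat.find_min'
        have : ((numbers.length - 1 : Nat) : Int) + 1 = N := by rw [hNval]; omega
        rwa [this]
      omega
    rw [pvOuterA_found numbers (N + 1 - 1).toNat 1 (N + 1) r rfl (by omega) (by omega) hQr
      (fun x hx1 hx2 => hmin x hx1 hx2)]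
    rw [hQN]
    simp only [Bool.not_true, Bool.false_eq_true, if_false]
    rw [pvBsearch_spec numbers (pvDistinct_mono numbers) r (by omega) hQr hmin (N - 1).toNat 1 N
      (le_refl _) (by omega) (by omega) hrN]
  · -- no length works: both fall through to len(numbers[0])
    have hall : ∀ x : Int, 1 ≤ x → x < N + 1 → pvDistinct numbers x = false := by
      intro x hx1 hx2
      by_contra hc
      have := pvDistinct_mono numbers x N hx1 (by omega) (Bool.not_eq_false _ ▸ hc)
      exact hQN this
    rw [pvOuterA_none numbers (N + 1 - 1).toNat 1 (N + 1) rfl hall]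
    rw [Bool.eq_false_iff.mpr hQN]
    simp
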